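/- GENERATED by mk_final_copies.py from the proof of the farm's unit `__asan_load1_noabort` (farm:__asan_load1_noabort.1: Proof.lean) as the
   re-elaboration sweep compiled it — do not edit. -/
import Asan.CheckWalk
import Vorbis.Spec.Units.asan_load1_noabort

open X86 X86.User Asan Vorbis

set_option maxRecDepth 4000
set_option maxHeartbeats 4000000

/-- `__asan_load1_noabort` satisfies its contract `Asan.SmallCheck`: entered with an accessible byte it returns, changing only
rax rdx rsp and the flags; its two paths into `__asan_report` (0x100307 `ja`, 0x100322 `jle`) are infeasible from
`AccessibleSmall`. -/
theorem Vorbis.Spec.Worked.asan_load1_noabort_ok : Vorbis.Spec.asan_load1_noabort.Statement := by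
  intro Lay hLay μ hμ u₀ hcode
  refine SmallCheck.mk' (by omega) (by decide) ?_
  intro u ret hrip hcodeOK hsp hret hretlt hacc
  obtain ⟨hsealed, hceil, hA⟩ := hacc
  -- the one shadow byte the routine looks at (asan_rt.c:27), and what `Accessible` says of it
  have hs1 := shadowOf_lt u.mem ((u.reg .rdi).toNat / 8)
  have hlast := hA.last_ok
  have e1 : (u.reg .rdi).toNat + 1 - 1 = (u.reg .rdi).toNat := by omega
  rw [e1] at hlast
  have r1 : u.mem.readLE (u.reg .rdi >>> 3 + 12582912) 1 = shadowOf u.mem ((u.reg .rdi).toNat / 8) := readLE_shadow _ _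
  generalize shadowOf u.mem ((u.reg .rdi).toNat / 8) = s1 at *
  -- (a fact about the vector registers, so that the walk tracks them: `Checked.zmm`)
  have hzmm : u.zmm = u.zmm := rfl
  -- 0x100300 … 0x100333: one walk over all paths; the `ja` arm at 0x100307 is pruned by the ceiling `hceil`
  u_walk hcode [hμ.vendor] span [Vorbis.L.textLo, Vorbis.L.textHi] side (v_side)
  all_goals first
    | -- a returning path (0x100324 `ret`, after `je` or after `jle` not taken): the state after the `ret` is `Checked`
      (refine ReachVia.done ⟨w_rip, w_rsp, RegsKept.mono_all w_kept (by rfl), w_mem, w_zmm, w_mxcsr, ?_⟩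
       rw [w_flags]
       exact X86.User.df_setStatus _ _)
    | -- the failing path 0x100325 … 0x100333 (its side conditions, and the state at `__asan_report`): infeasible,
      -- the byte is accessible (`hlast`) yet `(signed char) s ≤ (signed char) (addr & 7)` (`hbr_100322`)
      (exfalso
       simp only [byte_toNat _ hs1, byte_toInt _ hs1, and7_toInt, part32_toNat] at *
       omega)
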